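-- pv_equiv track=rewrite | github.com/megumi-ben/work13-wd | Free/free_pg_baseline/freepg/regex_literals.py | is_pure_literal
-- ===== SOURCE A (Python) =====
-- def is_pure_literal(text: str) -> bool:
--     i = 0
--     n = len(text)
--     while i < n:
--         ch = text[i]
--         if ch == "\\":
--             i += 2
--             continue
--         if ch in "[](){}*+?|":
--             return False
--         i += 1
--     return True
-- ===== SOURCE B (Python) =====
-- def is_pure_literal(text: str) -> bool:
--     # Phase 1: remove every backslash-plus-following-character pair
--     # (a trailing lone backslash is simply dropped).
--     stripped = []
--     it = iter(text)
--     for ch in it: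
--         if ch == "\\":
--             next(it, None)
--         else:
--             stripped.append(ch)
--     # Phase 2: plain membership scan of the remaining characters.
--     return not any(c in "[](){}*+?|" for c in stripped)
-- ===== Notes on version B (the rewrite author's own statement) =====
-- stated objective: alternative
-- what changed: Replaces A's single escape-aware index walk with early return by a two-phase computation: first strip every backslash+next-character pair into a filtered list, then a plain membership scan over the remainder.
import Mathlib
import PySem

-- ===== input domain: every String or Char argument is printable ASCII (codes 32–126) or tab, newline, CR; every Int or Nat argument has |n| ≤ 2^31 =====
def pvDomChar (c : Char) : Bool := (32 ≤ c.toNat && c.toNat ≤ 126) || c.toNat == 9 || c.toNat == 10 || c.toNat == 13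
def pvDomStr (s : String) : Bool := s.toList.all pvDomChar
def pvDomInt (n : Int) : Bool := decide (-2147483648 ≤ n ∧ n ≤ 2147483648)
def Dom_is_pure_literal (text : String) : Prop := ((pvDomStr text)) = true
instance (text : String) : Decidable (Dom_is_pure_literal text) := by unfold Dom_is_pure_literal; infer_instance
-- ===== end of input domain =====

-- B replaces A's single escape-aware index walk (with early return) by a two-phase
-- computation: strip every backslash+next-char pair, then a plain membership scan (alternative).

-- ===== PORT A =====
-- A's while loop over an index i with i+=2 on backslash, early False on a metacharacter.
def isPureA_loop (cs : List Char) (n i : Nat) : Bool :=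
  if _h : i < n then
    let ch := cs.getD i ' '
    if ch = '\\' then isPureA_loop cs n (i + 2)
    else if ("[](){}*+?|".toList.contains ch) then false
    else isPureA_loop cs n (i + 1)
  else true
termination_by n - i

def is_pure_literal (text : String) : Bool :=
  isPureA_loop text.toList text.toList.length 0

-- ===== PORT B =====
-- Phase 1 of B: drop each backslash together with the following character.
def stripEsc : List Char → List Char
  | [] => []
  | c :: rest =>
    if c = '\\' then
      match rest with
      | [] => []
      | _ :: t => stripEsc t
    else c :: stripEsc rest

def is_pure_literal_alt (text : String) : Bool :=
  !((stripEsc text.toList).any (fun c => "[](){}*+?|".toList.contains c))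

-- ===== PRECONDITION & SPEC =====
def Spec_is_pure_literal (text : String) (out : Bool) : Prop := out = is_pure_literal_alt text
instance (text : String) (out : Bool) : Decidable (Spec_is_pure_literal text out) := by unfold Spec_is_pure_literal; infer_instance

-- ===== CLAIM (what is proved, stated in full; the proofs are below) =====
def Claim_equal_is_pure_literal : Prop := ∀ (text : String), Dom_is_pure_literal text → Spec_is_pure_literal text (is_pure_literal text)

-- ===== LEMMAS AND PROOFS =====

theorem stripEsc_cons (c : Char) (rest : List Char) (hc : c ≠ '\\') :
    stripEsc (c :: rest) = c :: stripEsc rest := by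
  cases rest with
  | nil => simp only [stripEsc, if_neg hc]
  | cons d t => simp only [stripEsc, if_neg hc]

theorem isPureA_loop_eq (cs : List Char) (i : Nat) :
    isPureA_loop cs cs.length i = !((stripEsc (cs.drop i)).any (fun c => "[](){}*+?|".toList.contains c)) := by
  rw [isPureA_loop]
  by_cases h : i < cs.length
  · simp only [h, dif_pos]
    have hget : cs.drop i = cs.getD i ' ' :: cs.drop (i + 1) := by
      rw [List.getD_eq_getElem cs ' ' h]
      exact (List.drop_eq_getElem_cons h)
    by_cases hb : cs.getD i ' ' = '\\'
    · rw [if_pos hb, isPureA_loop_eq cs (i + 2), hget, hb]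
      have h3 : cs.drop (i + 2) = List.drop 1 (cs.drop (i + 1)) := by
        rw [List.drop_drop]
      cases h2 : cs.drop (i + 1) with
      | nil =>
        rw [h2] at h3
        simp [h3, stripEsc]
      | cons d t =>
        rw [h2] at h3
        simp only [List.drop_one, List.tail_cons] at h3
        rw [h3]
        rfl
    · rw [if_neg hb, hget, stripEsc_cons _ _ hb]
      by_cases hm : ("[](){}*+?|".toList.contains (cs.getD i ' ')) = true
      · rw [if_pos hm]
        simp only [List.any_cons, hm, Bool.true_or, Bool.not_true]
      · rw [if_neg hm, isPureA_loop_eq cs (i + 1)]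
        have hm' : ("[](){}*+?|".toList.contains (cs.getD i ' ')) = false :=
          Bool.not_eq_true _ ▸ eq_false_of_ne_true hm
        simp only [List.any_cons, hm', Bool.false_or]
  · have h1 : cs.drop i = [] := List.drop_eq_nil_of_le (by omega)
    simp [h, h1, stripEsc]
termination_by cs.length - i

-- ===== VERDICT (by name: the statement is the Claim_ definition above) =====
theorem is_pure_literal_spec : Claim_equal_is_pure_literal := by
  intro text _
  unfold Spec_is_pure_literal is_pure_literal is_pure_literal_alt
  simpa using isPureA_loop_eq text.toList 0
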